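-- pv_equiv track=rewrite | github.com/Pre-maestria2024/examen-practico-4-yancalderon | problema2.py | longest_path_to_leaf
-- ===== SOURCE A (Python) =====
-- def longest_path_to_leaf(children, depth, n):
--     longest = [0] * n
--
--     def dfs(node):
--         if not children[node]:
--             longest[node] = depth[node] + 1
--             return longest[node]
--
--         max_child_path = 0
--         for child in children[node]:
--             max_child_path = max(max_child_path, dfs(child))
--         longest[node] = max_child_path
--         return longest[node]
--
--     dfs(0)
--     return longest
-- ===== SOURCE B (Python) =====
-- def longest_path_to_leaf(children, depth, n):
--     # Iterative alternative: BFS from node 0 to collect the visited nodes,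
--     # then a round-based value iteration (repeat until no value changes),
--     # then write the settled values into the output list.  No recursion.
--     longest = [0] * n
--
--     # 1. collect the nodes reachable from node 0 (BFS with a queue)
--     order = [0]
--     seen = {0}
--     qi = 0
--     while qi < len(order):
--         u = order[qi]
--         qi += 1
--         for c in children[u]:
--             if c not in seen:
--                 seen.add(c)
--                 order.append(c)
--
--     # 2. value iteration: update every node's value from its children's
--     #    current values until a full round changes nothing
--     val = {u: 0 for u in order}
--     changed = True
--     while changed:
--         changed = False
--         for u in order:
--             cs = children[u]
--             if not cs:
--                 new = depth[u] + 1
--             else: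
--                 new = max(0, max(val[c] for c in cs))
--             if new != val[u]:
--                 val[u] = new
--                 changed = True
--
--     # 3. write the settled values into the output list
--     for u in order:
--         longest[u] = val[u]
--     return longest
-- ===== Notes on version B (the rewrite author's own statement) =====
-- stated objective: alternative
-- what changed: Replaces the recursive DFS with mutable closure state by an iterative three-phase algorithm: a queue-based BFS collecting the nodes reachable from 0, a round-based value iteration repeated until no value changes, and a final write-out of the settled values; no recursion and no call stack.
-- outside the precondition, e.g. on longest_path_to_leaf([[1, -2], [], []], [5, 6, 7], 3): A returns [7, 7, 0], B returns [7, 7, 0]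
import Mathlib
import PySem

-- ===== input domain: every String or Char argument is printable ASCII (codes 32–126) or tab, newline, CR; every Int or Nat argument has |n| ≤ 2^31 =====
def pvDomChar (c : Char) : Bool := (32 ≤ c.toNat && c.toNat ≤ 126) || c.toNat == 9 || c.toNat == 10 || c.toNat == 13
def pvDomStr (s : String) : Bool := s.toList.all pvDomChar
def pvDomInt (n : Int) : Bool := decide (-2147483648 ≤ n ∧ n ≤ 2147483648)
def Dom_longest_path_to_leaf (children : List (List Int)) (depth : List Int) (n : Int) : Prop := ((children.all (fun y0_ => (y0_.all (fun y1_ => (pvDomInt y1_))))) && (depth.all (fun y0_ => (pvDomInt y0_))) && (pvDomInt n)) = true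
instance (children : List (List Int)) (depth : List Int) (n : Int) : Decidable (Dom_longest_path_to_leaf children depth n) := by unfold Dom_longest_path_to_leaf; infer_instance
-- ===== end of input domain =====

-- B replaces A's recursive DFS (mutable closure state) by an iterative three-phase
-- algorithm: BFS collecting the reachable nodes, round-based value iteration until a
-- round changes nothing, then a write-out pass (alternative decomposition, no recursion).

-- ===== PORT A =====
-- dfs(node): the closure mutating `longest`; threaded here as (longest, returned value).
-- The fuel argument only makes the recursion total: a terminating Python run revisits no
-- node on a path, so its depth is bounded by the fuel chosen below; pySetD / pyGet? carry
-- Python's indexing (none = IndexError; on the none branches Python raises, which Pre_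
-- excludes).
def pvDfsA (children : List (List Int)) (depth : List Int) :
    Nat → Int → List Int → List Int × Int
  | 0, _, longest => (longest, 0)
  | fuel+1, node, longest =>
    match PySem.List.pyGet? children node with
    | none => (longest, 0)                 -- IndexError, excluded by Pre_
    | some cs =>
      if cs = [] then
        match PySem.List.pyGet? depth node with
        | none => (longest, 0)             -- IndexError, excluded by Pre_
        | some d => (PySem.List.pySetD longest node (d+1), d+1)
      else
        let st := cs.foldl (fun (st : List Int × Int) c =>
          let t := pvDfsA children depth fuel c st.1
          (t.1, max st.2 t.2)) (longest, 0)
        (PySem.List.pySetD st.1 node st.2, st.2)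

def longest_path_to_leaf (children : List (List Int)) (depth : List Int) (n : Int) : List Int :=
  (pvDfsA children depth (n.toNat + children.length + children.flatten.length + 3) 0
    (List.replicate n.toNat 0)).1

-- ===== PORT B =====
-- children[u] (none = IndexError, which Pre_ excludes; [] stands for the raised case)
def pvKids (children : List (List Int)) (u : Int) : List Int :=
  (PySem.List.pyGet? children u).getD []

-- phase 1 of Source B: the BFS while-loop over (order, seen, qi); fuel only bounds the loop
def pvBfs (children : List (List Int)) :
    Nat → List Int → PySem.Set Int → Nat → List Int
  | 0, order, _, _ => order
  | fuel+1, order, seen, qi =>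
    if qi < order.length then
      let u := order.getD qi 0
      let st := (pvKids children u).foldl
        (fun (st : List Int × PySem.Set Int) c =>
          if PySem.Set.contains st.2 c then st
          else (st.1 ++ [c], PySem.Set.add st.2 c)) (order, seen)
      pvBfs children fuel st.1 st.2 (qi+1)
    else order

-- the value Source B computes for u in one update: depth[u] + 1 if not cs else max(0, max(val[c]..))
-- (pyGet? depth u is some under Pre_; val[c] is present under Pre_, getD carries it)
def pvNew (children : List (List Int)) (depth : List Int)
    (v : PySem.Dict Int Int) (u : Int) : Int :=
  match pvKids children u with
  | [] => (PySem.List.pyGet? depth u).getD 0 + 1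
  | c0 :: rest =>
    max 0 (rest.foldl (fun m c => max m (PySem.Dict.getD v c 0)) (PySem.Dict.getD v c0 0))

-- phase 2, one round of the while-changed loop (changed starts False each round)
def pvRound (children : List (List Int)) (depth : List Int)
    (order : List Int) (v : PySem.Dict Int Int) : PySem.Dict Int Int × Bool :=
  order.foldl (fun (st : PySem.Dict Int Int × Bool) u =>
    let new := pvNew children depth st.1 u
    if new = PySem.Dict.getD st.1 u 0 then st
    else (PySem.Dict.insert st.1 u new, true)) (v, false)

-- phase 2, the while-changed loop; fuel only bounds the loop
def pvIter (children : List (List Int)) (depth : List Int) (order : List Int) :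
    Nat → PySem.Dict Int Int → PySem.Dict Int Int
  | 0, v => v
  | fuel+1, v =>
    let st := pvRound children depth order v
    if st.2 then pvIter children depth order fuel st.1 else st.1

def longest_path_to_leaf_alt (children : List (List Int)) (depth : List Int) (n : Int) : List Int :=
  let order := pvBfs children (children.flatten.length + 2) [0] (PySem.Set.ofList [0]) 0
  let val0 := order.foldl (fun d u => PySem.Dict.insert d u 0) PySem.Dict.empty
  let val := pvIter children depth order (order.length + 2) val0
  order.foldl (fun longest u =>
    PySem.List.pySetD longest u (PySem.Dict.getD val u 0)) (List.replicate n.toNat 0)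

-- ===== PRECONDITION & SPEC =====
-- one closure step of reachability along child lists (a property of the input graph)
def pvStep (children : List (List Int)) (s : List Int) : List Int :=
  s ++ ((s.flatMap (pvKids children)).filter (fun c => !(s.contains c))).dedup

def pvCloseN (children : List (List Int)) : Nat → List Int → List Int
  | 0, s => s
  | k+1, s => pvStep children (pvCloseN children k s)

def pvFuel (children : List (List Int)) : Nat := children.flatten.length + 2

-- the set of nodes reachable from node 0 (closure reached within pvFuel steps)
def pvRch (children : List (List Int)) : List Int :=
  pvCloseN children (pvFuel children) [0]

-- Pre_ restricts to the natural domain of the task: every node the traversal reaches from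
-- node 0 is a genuine index (in [0, n) and [0, len(children))), reachable leaves have a
-- depth entry, and the reachable graph is acyclic; outside this shape A raises IndexError
-- or recurses forever, except for negative in-range indices, where A reads and writes rows
-- through Python's negative-index wraparound (malformed tree input; see cites).
def Pre_longest_path_to_leaf (children : List (List Int)) (depth : List Int) (n : Int) : Prop :=
  (∀ r ∈ pvRch children,
      (0 ≤ r ∧ r < n ∧ r < (children.length : Int)) ∧
      (pvKids children r = [] → r < (depth.length : Int))) ∧
  (∀ r ∈ pvRch children,
      r ∉ pvCloseN children (pvFuel children) ((pvKids children r).dedup))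

instance (children : List (List Int)) (depth : List Int) (n : Int) :
    Decidable (Pre_longest_path_to_leaf children depth n) := by
  unfold Pre_longest_path_to_leaf; infer_instance

def pvWitness_longest_path_to_leaf : List (List Int) × List Int × Int :=
  ([[1, 2], [], []], [0, 1, 1], 3)

def Spec_longest_path_to_leaf (children : List (List Int)) (depth : List Int) (n : Int) (out : List Int) : Prop := out = longest_path_to_leaf_alt children depth n
instance (children : List (List Int)) (depth : List Int) (n : Int) (out : List Int) : Decidable (Spec_longest_path_to_leaf children depth n out) := by unfold Spec_longest_path_to_leaf; infer_instance

-- ===== CLAIM (what is proved, stated in full; the proofs are below) =====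
def Claim_equal_longest_path_to_leaf : Prop := ∀ (children : List (List Int)) (depth : List Int) (n : Int), Dom_longest_path_to_leaf children depth n → Pre_longest_path_to_leaf children depth n → Spec_longest_path_to_leaf children depth n (longest_path_to_leaf children depth n)

-- ===== LEMMAS AND PROOFS =====


-- ---------- closure infrastructure ----------

theorem pyGet?_mem {α : Type} (xs : List α) (i : Int) (y : α)
    (h : PySem.List.pyGet? xs i = some y) : y ∈ xs := by
  simp only [PySem.List.pyGet?, PySem.List.pyIdx?] at h
  split at h <;>
  · rcases Option.bind_eq_some_iff.mp h with ⟨a, ha, hg⟩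
    exact List.mem_of_getElem? hg

theorem pvKids_subset_flatten (children : List (List Int)) (u : Int) :
    ∀ c ∈ pvKids children u, c ∈ children.flatten := by
  intro c hc
  unfold pvKids at hc
  cases h : PySem.List.pyGet? children u with
  | none => rw [h] at hc; simp at hc
  | some row =>
    rw [h] at hc
    simp only [Option.getD_some] at hc
    exact List.mem_flatten.mpr ⟨row, pyGet?_mem children u row h, hc⟩

theorem mem_pvStep (children : List (List Int)) (s : List Int) (x : Int) :
    x ∈ pvStep children s ↔ x ∈ s ∨ ∃ a ∈ s, x ∈ pvKids children a := by
  unfold pvStep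
  simp only [List.mem_append, List.mem_dedup, List.mem_filter, List.mem_flatMap,
    Bool.not_eq_eq_eq_not, Bool.not_true, List.contains_eq_mem, decide_eq_false_iff_not]
  constructor
  · rintro (h | ⟨⟨a, ha, hx⟩, _⟩)
    · exact Or.inl h
    · exact Or.inr ⟨a, ha, hx⟩
  · rintro (h | ⟨a, ha, hx⟩)
    · exact Or.inl h
    · by_cases hs : x ∈ s
      · exact Or.inl hs
      · exact Or.inr ⟨⟨a, ha, hx⟩, hs⟩

theorem subset_pvStep (children : List (List Int)) (s : List Int) : s ⊆ pvStep children s :=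
  fun _ hx => (mem_pvStep children s _).mpr (Or.inl hx)

theorem nodup_pvStep (children : List (List Int)) (s : List Int) (h : s.Nodup) :
    (pvStep children s).Nodup := by
  unfold pvStep
  refine List.Nodup.append h (List.nodup_dedup _) ?_
  intro x hx hx'
  have := List.of_mem_filter (List.mem_dedup.mp hx')
  simp only [Bool.not_eq_eq_eq_not, Bool.not_true, List.contains_eq_mem,
    decide_eq_false_iff_not] at this
  exact this hx

theorem pvCloseN_succ (children : List (List Int)) (k : Nat) (s : List Int) :
    pvCloseN children (k+1) s = pvStep children (pvCloseN children k s) := rfl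

theorem subset_pvCloseN (children : List (List Int)) (k : Nat) (s : List Int) :
    s ⊆ pvCloseN children k s := by
  induction k with
  | zero => exact fun x h => h
  | succ m ih => exact fun x h => subset_pvStep children _ (ih h)

theorem nodup_pvCloseN (children : List (List Int)) (k : Nat) (s : List Int) (h : s.Nodup) :
    (pvCloseN children k s).Nodup := by
  induction k with
  | zero => exact h
  | succ m ih => exact nodup_pvStep children _ ih

theorem pvCloseN_subset_cand (children : List (List Int)) (cand : List Int)
    (hf : ∀ x ∈ children.flatten, x ∈ cand) (k : Nat) (s : List Int)
    (hs : ∀ x ∈ s, x ∈ cand) : ∀ x ∈ pvCloseN children k s, x ∈ cand := by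
  induction k with
  | zero => exact hs
  | succ m ih =>
    intro x hx
    rcases (mem_pvStep children _ x).mp hx with h | ⟨a, _, hk⟩
    · exact ih x h
    · exact hf x (pvKids_subset_flatten children a x hk)

theorem closed_of_pvStep_eq (children : List (List Int)) (s : List Int)
    (h : pvStep children s = s) : ∀ a ∈ s, ∀ c ∈ pvKids children a, c ∈ s := by
  intro a ha c hc
  have : c ∈ pvStep children s := (mem_pvStep children s c).mpr (Or.inr ⟨a, ha, hc⟩)
  rwa [h] at this

theorem pvCloseN_stable (children : List (List Int)) (s : List Int)
    (h : pvStep children s = s) (k : Nat) : pvCloseN children k s = s := by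
  induction k with
  | zero => rfl
  | succ m ih => rw [pvCloseN_succ, ih, h]

theorem pvCloseN_add (children : List (List Int)) (k m : Nat) (s : List Int) :
    pvCloseN children (k + m) s = pvCloseN children m (pvCloseN children k s) := by
  induction m with
  | zero => rfl
  | succ j ih => rw [show k + (j+1) = (k+j) + 1 by omega, pvCloseN_succ, ih]; rfl

theorem length_lt_of_pvStep_ne (children : List (List Int)) (s : List Int)
    (h : pvStep children s ≠ s) : s.length < (pvStep children s).length := by
  unfold pvStep at *
  cases he : ((s.flatMap (pvKids children)).filter (fun c => !(s.contains c))).dedup with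
  | nil => rw [he, List.append_nil] at h; exact absurd rfl h
  | cons y t => simp

theorem nodup_subset_length {α : Type} [DecidableEq α] (l m : List α) (hl : l.Nodup) (hm : m.Nodup)
    (h : ∀ x ∈ l, x ∈ m) : l.length ≤ m.length := by
  rw [← List.toFinset_card_of_nodup hl, ← List.toFinset_card_of_nodup hm]
  exact Finset.card_le_card (fun x hx => List.mem_toFinset.mpr (h x (List.mem_toFinset.mp hx)))

-- the closure stabilizes within the fuel: pvCloseN pvFuel is closed under children edges
theorem pvCloseN_closed (children : List (List Int)) (cand : List Int) (s : List Int)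
    (hs : ∀ x ∈ s, x ∈ cand) (hf : ∀ x ∈ children.flatten, x ∈ cand)
    (hnod : s.Nodup) (hfuel : cand.length < pvFuel children) :
    ∀ a ∈ pvCloseN children (pvFuel children) s, ∀ c ∈ pvKids children a,
      c ∈ pvCloseN children (pvFuel children) s := by
  have hgrow : ∀ k : Nat, (∀ j < k, pvStep children (pvCloseN children j s) ≠ pvCloseN children j s) →
      k ≤ (pvCloseN children k s).length := by
    intro k
    induction k with
    | zero => intro _; omega
    | succ m ih =>
      intro h
      have h1 := ih (fun j hj => h j (by omega))
      have h2 := length_lt_of_pvStep_ne children (pvCloseN children m s) (h m (by omega))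
      rw [pvCloseN_succ]
      omega
  have hbound : ∀ k : Nat, (pvCloseN children k s).length ≤ cand.length := by
    intro k
    have h1 : (pvCloseN children k s).length ≤ cand.dedup.length := by
      refine nodup_subset_length _ _ (nodup_pvCloseN children k s hnod) (List.nodup_dedup cand) ?_
      intro x hx
      exact List.mem_dedup.mpr (pvCloseN_subset_cand children cand hf k s hs x hx)
    have h2 : cand.dedup.length ≤ cand.length := (List.dedup_sublist cand).length_le
    omega
  have hex : ∃ j, j ≤ cand.length ∧
      pvStep children (pvCloseN children j s) = pvCloseN children j s := by
    by_contra hno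
    push Not at hno
    have : ∀ j < cand.length + 1, pvStep children (pvCloseN children j s) ≠ pvCloseN children j s := by
      intro j hj
      exact hno j (by omega)
    have := hgrow (cand.length + 1) this
    have := hbound (cand.length + 1)
    omega
  obtain ⟨j, hj, hfix⟩ := hex
  have heq : pvCloseN children (pvFuel children) s = pvCloseN children j s := by
    have : pvFuel children = j + (pvFuel children - j) := by omega
    rw [this, pvCloseN_add, pvCloseN_stable children _ hfix]
  rw [heq]
  exact closed_of_pvStep_eq children _ (hfix)

theorem pvCloseN_least (children : List (List Int)) (T : List Int)
    (hT : ∀ a ∈ T, ∀ c ∈ pvKids children a, c ∈ T) (k : Nat) (s : List Int)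
    (hs : ∀ x ∈ s, x ∈ T) : ∀ x ∈ pvCloseN children k s, x ∈ T := by
  induction k with
  | zero => exact hs
  | succ m ih =>
    intro x hx
    rcases (mem_pvStep children _ x).mp hx with h | ⟨a, ha, hk⟩
    · exact ih x h
    · exact hT a (ih a ha) x hk


-- ---------- pvRch / rank ----------

theorem zero_mem_pvRch (children : List (List Int)) : (0:Int) ∈ pvRch children :=
  subset_pvCloseN children _ [0] (by simp)

theorem pvRch_closed (children : List (List Int)) :
    ∀ a ∈ pvRch children, ∀ c ∈ pvKids children a, c ∈ pvRch children := by
  refine pvCloseN_closed children (0 :: children.flatten) [0] ?_ ?_ (by simp) ?_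
  · intro x hx; simp at hx; simp [hx]
  · intro x hx; simp [hx]
  · simp [pvFuel]

theorem nodup_pvRch (children : List (List Int)) : (pvRch children).Nodup :=
  nodup_pvCloseN children _ [0] (by simp)

def pvDown (children : List (List Int)) (r : Int) : List Int :=
  pvCloseN children (pvFuel children) [r]

def pvRank (children : List (List Int)) (r : Int) : Nat := (pvDown children r).length

theorem self_mem_pvDown (children : List (List Int)) (r : Int) : r ∈ pvDown children r :=
  subset_pvCloseN children _ [r] (by simp)

theorem pvDown_closed (children : List (List Int)) (r : Int) :
    ∀ a ∈ pvDown children r, ∀ c ∈ pvKids children a, c ∈ pvDown children r := by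
  refine pvCloseN_closed children (r :: children.flatten) [r] ?_ ?_ (by simp) ?_
  · intro x hx; simp at hx; simp [hx]
  · intro x hx; simp [hx]
  · simp [pvFuel]

theorem nodup_pvDown (children : List (List Int)) (r : Int) : (pvDown children r).Nodup :=
  nodup_pvCloseN children _ [r] (by simp)

theorem pvDown_subset_closed (children : List (List Int)) (r : Int) (T : List Int)
    (hT : ∀ a ∈ T, ∀ c ∈ pvKids children a, c ∈ T) (hr : r ∈ T) :
    ∀ x ∈ pvDown children r, x ∈ T :=
  pvCloseN_least children T hT _ [r] (by intro x hx; simp at hx; rwa [hx])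

theorem pvRank_pos (children : List (List Int)) (r : Int) : 0 < pvRank children r := by
  unfold pvRank
  have := self_mem_pvDown children r
  cases h : pvDown children r with
  | nil => rw [h] at this; simp at this
  | cons a t => simp

-- acyclicity (the second conjunct of Pre_) makes the rank drop along child edges
theorem pvRank_lt (children : List (List Int)) (r : Int)
    (hacy : r ∉ pvCloseN children (pvFuel children) ((pvKids children r).dedup)) :
    ∀ c ∈ pvKids children r, pvRank children c < pvRank children r := by
  intro c hc
  have hCclosed := pvCloseN_closed children children.flatten ((pvKids children r).dedup)
    (fun x hx => pvKids_subset_flatten children r x (List.mem_dedup.mp hx))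
    (fun x hx => hx) (List.nodup_dedup _) (by simp [pvFuel])
  have hcC : c ∈ pvCloseN children (pvFuel children) ((pvKids children r).dedup) :=
    subset_pvCloseN children _ _ (List.mem_dedup.mpr hc)
  have hdc : ∀ x ∈ pvDown children c, x ∈ pvCloseN children (pvFuel children) ((pvKids children r).dedup) :=
    pvDown_subset_closed children c _ hCclosed hcC
  have hrd : r ∉ pvDown children c := fun h => hacy (hdc r h)
  have hsub : ∀ x ∈ pvDown children c, x ∈ pvDown children r := by
    refine pvDown_subset_closed children c _ (pvDown_closed children r) ?_
    exact pvDown_closed children r r (self_mem_pvDown children r) c hc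
  unfold pvRank
  rw [← List.toFinset_card_of_nodup (nodup_pvDown children c),
      ← List.toFinset_card_of_nodup (nodup_pvDown children r)]
  refine Finset.card_lt_card ?_
  constructor
  · intro x hx
    exact List.mem_toFinset.mpr (hsub x (List.mem_toFinset.mp hx))
  · intro hback
    exact hrd (List.mem_toFinset.mp (hback (List.mem_toFinset.mpr (self_mem_pvDown children r))))

theorem pvRank_le_len (children : List (List Int)) (r : Int) (hr : r ∈ pvRch children) :
    pvRank children r ≤ (pvRch children).length := by
  refine nodup_subset_length _ _ (nodup_pvDown children r) (nodup_pvRch children) ?_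
  exact pvDown_subset_closed children r _ (pvRch_closed children) hr

theorem pvRch_length_le (children : List (List Int)) (n : Int)
    (hb : ∀ r ∈ pvRch children, 0 ≤ r ∧ r < n ∧ r < (children.length : Int)) :
    (pvRch children).length ≤ children.length := by
  have hnod : ((pvRch children).map Int.toNat).Nodup := by
    refine List.Nodup.map_on ?_ (nodup_pvRch children)
    intro x hx y hy hxy
    have h1 := (hb x hx).1
    have h2 := (hb y hy).1
    omega
  have hsub : ∀ m ∈ (pvRch children).map Int.toNat, m ∈ List.range children.length := by
    intro m hm
    rcases List.mem_map.mp hm with ⟨x, hx, hxm⟩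
    have := hb x hx
    rw [List.mem_range]
    omega
  have := nodup_subset_length ((pvRch children).map Int.toNat) (List.range children.length)
    hnod List.nodup_range hsub
  simpa using this

theorem pvRank_le_L (children : List (List Int)) (n : Int) (r : Int)
    (hr : r ∈ pvRch children)
    (hb : ∀ r ∈ pvRch children, 0 ≤ r ∧ r < n ∧ r < (children.length : Int)) :
    pvRank children r ≤ children.length :=
  le_trans (pvRank_le_len children r hr) (pvRch_length_le children n hb)


-- ---------- A-side: pure value / visited-set devices ----------

-- the value dfs(node) returns, as a pure fuel-indexed function (proof device)
def pvVal (children : List (List Int)) (depth : List Int) : Nat → Int → Int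
  | 0, _ => 0
  | f+1, node =>
    match PySem.List.pyGet? children node with
    | none => 0
    | some cs =>
      if cs = [] then
        match PySem.List.pyGet? depth node with
        | none => 0
        | some d => d + 1
      else cs.foldl (fun m c => max m (pvVal children depth f c)) 0

-- the settled value (any fuel beyond the rank computes it)
def pvV (children : List (List Int)) (depth : List Int) (u : Int) : Int :=
  pvVal children depth (children.length + 1) u

-- "cell j is visited by dfs(node) within the given fuel"
def pvReach (children : List (List Int)) : Nat → Int → Nat → Bool
  | 0, _, _ => false
  | f+1, node, j =>
    node == (j : Int) ||
      (match PySem.List.pyGet? children node with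
       | none => false
       | some cs => cs.any fun c => pvReach children f c j)

theorem pvVal_unfold (children : List (List Int)) (depth : List Int) (f : Nat) (node : Int) :
    pvVal children depth (f+1) node =
      match PySem.List.pyGet? children node with
      | none => 0
      | some cs =>
        if cs = [] then
          match PySem.List.pyGet? depth node with
          | none => 0
          | some d => d + 1
        else cs.foldl (fun m c => max m (pvVal children depth f c)) 0 := rfl

theorem pvReach_unfold (children : List (List Int)) (f : Nat) (node : Int) (j : Nat) :
    pvReach children (f+1) node j =
      (node == (j : Int) ||
        (match PySem.List.pyGet? children node with
         | none => false
         | some cs => cs.any fun c => pvReach children f c j)) := rfl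

theorem pvDfsA_unfold (children : List (List Int)) (depth : List Int) (fuel : Nat)
    (node : Int) (longest : List Int) :
    pvDfsA children depth (fuel+1) node longest =
      match PySem.List.pyGet? children node with
      | none => (longest, 0)
      | some cs =>
        if cs = [] then
          match PySem.List.pyGet? depth node with
          | none => (longest, 0)
          | some d => (PySem.List.pySetD longest node (d+1), d+1)
        else
          let st := cs.foldl (fun (st : List Int × Int) c =>
            let t := pvDfsA children depth fuel c st.1
            (t.1, max st.2 t.2)) (longest, 0)
          (PySem.List.pySetD st.1 node st.2, st.2) := rfl

theorem pvKids_get (children : List (List Int)) (node : Int)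
    (h0 : 0 ≤ node) (hlt : node < (children.length : Int)) :
    PySem.List.pyGet? children node = some (pvKids children node) := by
  unfold pvKids
  rw [PySem.List.pyGet?_of_nonneg children h0,
      List.getElem?_eq_getElem (by omega : node.toNat < children.length)]
  rfl

theorem pvCloseN_zero_subset_pvRch (children : List (List Int)) (k : Nat) :
    ∀ x ∈ pvCloseN children k [0], x ∈ pvRch children := by
  refine pvCloseN_least children (pvRch children) (pvRch_closed children) k [0] ?_
  intro x hx; simp at hx; rw [hx]; exact zero_mem_pvRch children

theorem pvVal_succ (children : List (List Int)) (depth : List Int)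
    (hacy : ∀ r ∈ pvRch children,
      r ∉ pvCloseN children (pvFuel children) ((pvKids children r).dedup)) :
    ∀ f : Nat, ∀ node : Int, node ∈ pvRch children → pvRank children node ≤ f →
      pvVal children depth (f+1) node = pvVal children depth f node := by
  intro f
  induction f with
  | zero => intro node _ hf; have := pvRank_pos children node; omega
  | succ g ih =>
    intro node hmem hf
    rw [pvVal_unfold children depth (g+1) node, pvVal_unfold children depth g node]
    cases hg : PySem.List.pyGet? children node with
    | none => rfl
    | some cs =>
      by_cases hnil : cs = []
      · simp [hnil]
      · simp only [hnil, if_false]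
        refine PySem.List.foldl_congr_mem cs _ _ 0 ?_
        intro acc c hcm
        have hkids : pvKids children node = cs := by unfold pvKids; rw [hg]; rfl
        have hcK : c ∈ pvKids children node := hkids ▸ hcm
        have hcR : c ∈ pvRch children := pvRch_closed children node hmem c hcK
        have hrk : pvRank children c < pvRank children node :=
          pvRank_lt children node (hacy node hmem) c hcK
        rw [ih c hcR (by omega)]

theorem pvVal_eq (children : List (List Int)) (depth : List Int)
    (hacy : ∀ r ∈ pvRch children,
      r ∉ pvCloseN children (pvFuel children) ((pvKids children r).dedup))
    (node : Int) (hmem : node ∈ pvRch children) :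
    ∀ f f' : Nat, pvRank children node ≤ f → pvRank children node ≤ f' →
      pvVal children depth f node = pvVal children depth f' node := by
  have hadd : ∀ k f : Nat, pvRank children node ≤ f →
      pvVal children depth (f+k) node = pvVal children depth f node := by
    intro k
    induction k with
    | zero => intro f _; rfl
    | succ m ih =>
      intro f hf
      rw [show f + (m+1) = (f+m) + 1 by omega,
          pvVal_succ children depth hacy (f+m) node hmem (by omega), ih f hf]
  intro f f' hfle hfle'
  rcases Nat.le_total f f' with h | h
  · rw [show f' = f + (f' - f) by omega, hadd (f'-f) f hfle]
  · rw [show f = f' + (f - f') by omega, hadd (f-f') f' hfle']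

theorem pvVal_stable (children : List (List Int)) (depth : List Int) (n : Int)
    (hb : ∀ r ∈ pvRch children, 0 ≤ r ∧ r < n ∧ r < (children.length : Int))
    (hacy : ∀ r ∈ pvRch children,
      r ∉ pvCloseN children (pvFuel children) ((pvKids children r).dedup))
    (node : Int) (hmem : node ∈ pvRch children) (f : Nat)
    (hf : pvRank children node ≤ f) :
    pvVal children depth f node = pvV children depth node := by
  unfold pvV
  exact pvVal_eq children depth hacy node hmem f (children.length + 1) hf
    (by have := pvRank_le_L children n node hmem hb; omega)

-- ---------- pvReach basics ----------

theorem pvReach_step (children : List (List Int)) (f : Nat) (a : Int) (cs : List Int)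
    (c : Int) (j : Nat) (ha : PySem.List.pyGet? children a = some cs) (hc : c ∈ cs)
    (hr : pvReach children f c j = true) : pvReach children (f+1) a j = true := by
  rw [pvReach_unfold, ha]
  simp only [Bool.or_eq_true, List.any_eq_true]
  exact Or.inr ⟨c, hc, hr⟩

theorem pvReach_mono (children : List (List Int)) :
    ∀ f : Nat, ∀ node : Int, ∀ j : Nat,
      pvReach children f node j = true → pvReach children (f+1) node j = true := by
  intro f
  induction f with
  | zero => intro node j h; simp [pvReach] at h
  | succ g ih =>
    intro node j h
    simp only [pvReach] at h ⊢
    cases hg : PySem.List.pyGet? children node with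
    | none =>
      rw [hg] at h
      simpa using h
    | some cs =>
      rw [hg] at h
      simp only [Bool.or_eq_true, List.any_eq_true] at h ⊢
      rcases h with h1 | ⟨c, hc, hr⟩
      · exact Or.inl h1
      · refine Or.inr ⟨c, hc, ?_⟩
        have h2 := ih c j hr
        simp only [pvReach, Bool.or_eq_true] at h2
        exact h2

theorem pvReach_le (children : List (List Int)) :
    ∀ f g : Nat, f ≤ g → ∀ node : Int, ∀ j : Nat,
      pvReach children f node j = true → pvReach children g node j = true := by
  intro f g hfg
  induction g with
  | zero => intro node j h; interval_cases f; exact h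
  | succ g ih =>
    intro node j h
    rcases Nat.lt_or_ge f (g+1) with hlt | hge
    · exact pvReach_mono children g node j (ih (by omega) node j h)
    · have : f = g + 1 := by omega
      subst this; exact h

theorem pvReach_self (children : List (List Int)) (f : Nat) (node : Int)
    (h0 : 0 ≤ node) : pvReach children (f+1) node node.toNat = true := by
  simp only [pvReach, Bool.or_eq_true, beq_iff_eq]
  exact Or.inl (by omega)

theorem pvReach_extend (children : List (List Int)) :
    ∀ f : Nat, ∀ a : Int, ∀ b : Nat, ∀ cs : List Int, ∀ c : Int,
      pvReach children f a b = true →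
      PySem.List.pyGet? children (b : Int) = some cs → c ∈ cs → 0 ≤ c →
      pvReach children (f+1) a c.toNat = true := by
  intro f
  induction f with
  | zero => intro a b cs c h; simp [pvReach] at h
  | succ g ih =>
    intro a b cs c h hcs hmem h0
    rw [pvReach_unfold] at h
    cases hg : PySem.List.pyGet? children a with
    | none =>
      rw [hg] at h
      simp only [Bool.or_eq_true, beq_iff_eq] at h
      rcases h with h1 | h2
      · subst h1; rw [hg] at hcs; exact absurd hcs (by simp)
      · simp at h2
    | some cs' =>
      rw [hg] at h
      simp only [Bool.or_eq_true, beq_iff_eq, List.any_eq_true] at h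
      rcases h with h1 | ⟨d, hd, hr⟩
      · subst h1
        exact pvReach_step children (g+1) (↑b) cs c c.toNat hcs hmem
          (pvReach_self children g c h0)
      · exact pvReach_step children (g+1) a cs' d c.toNat hg hd
          (ih d b cs c hr hcs hmem h0)

-- every reachable node is visited by dfs(0) (given enough fuel)
theorem pvRch_to_reach (children : List (List Int)) (n : Int)
    (hb : ∀ r ∈ pvRch children, 0 ≤ r ∧ r < n ∧ r < (children.length : Int)) :
    ∀ k : Nat, ∀ x ∈ pvCloseN children k [0],
      pvReach children (k+1) 0 x.toNat = true := by
  intro k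
  induction k with
  | zero =>
    intro x hx
    simp only [pvCloseN, List.mem_singleton] at hx
    rw [hx]
    exact pvReach_self children 0 0 (by omega)
  | succ m ih =>
    intro x hx
    rcases (mem_pvStep children _ x).mp hx with h | ⟨a, ha, hk⟩
    · exact pvReach_mono children (m+1) 0 x.toNat (ih x h)
    · have haR : a ∈ pvRch children := pvCloseN_zero_subset_pvRch children m a ha
      have hxR : x ∈ pvRch children :=
        pvRch_closed children a haR x hk
      have h0a := (hb a haR).1
      have h0x := (hb x hxR).1
      have hget : PySem.List.pyGet? children ((a.toNat : Nat) : Int) = some (pvKids children a) := by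
        rw [show ((a.toNat : Nat) : Int) = a by omega]
        exact pvKids_get children a h0a (hb a haR).2.2
      exact pvReach_extend children (m+1) 0 a.toNat (pvKids children a) x
        (ih a ha) hget hk h0x

-- dfs from a reachable node visits only reachable cells
theorem reach_to_pvRch (children : List (List Int)) (n : Int)
    (hb : ∀ r ∈ pvRch children, 0 ≤ r ∧ r < n ∧ r < (children.length : Int)) :
    ∀ f : Nat, ∀ node : Int, ∀ j : Nat, node ∈ pvRch children →
      pvReach children f node j = true → ((j : Nat) : Int) ∈ pvRch children := by
  intro f
  induction f with
  | zero => intro node j _ h; simp [pvReach] at h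
  | succ g ih =>
    intro node j hmem h
    rw [pvReach_unfold] at h
    have hnode0 := (hb node hmem).1
    cases hg : PySem.List.pyGet? children node with
    | none =>
      rw [hg] at h
      simp only [Bool.or_eq_true, beq_iff_eq] at h
      rcases h with h1 | h2
      · rw [← h1]; exact hmem
      · simp at h2
    | some cs =>
      rw [hg] at h
      simp only [Bool.or_eq_true, beq_iff_eq, List.any_eq_true] at h
      rcases h with h1 | ⟨c, hcm, hr⟩
      · rw [← h1]
        exact hmem
      · have hkids : pvKids children node = cs := by unfold pvKids; rw [hg]; rfl
        have hcR : c ∈ pvRch children :=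
          pvRch_closed children node hmem c (hkids ▸ hcm)
        exact ih c j hcR hr


-- ---------- A-side characterisation ----------

theorem pvDfsA_spec (children : List (List Int)) (depth : List Int) (n : Int)
    (hb : ∀ r ∈ pvRch children, 0 ≤ r ∧ r < n ∧ r < (children.length : Int))
    (hd : ∀ r ∈ pvRch children, pvKids children r = [] → r < (depth.length : Int))
    (hacy : ∀ r ∈ pvRch children,
      r ∉ pvCloseN children (pvFuel children) ((pvKids children r).dedup)) :
    ∀ fuel : Nat, ∀ node : Int, ∀ longest : List Int,
      node ∈ pvRch children → pvRank children node ≤ fuel →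
      longest.length = n.toNat →
      (pvDfsA children depth fuel node longest).2 = pvVal children depth fuel node ∧
      (pvDfsA children depth fuel node longest).1.length = n.toNat ∧
      ∀ j : Nat, j < n.toNat →
        (pvDfsA children depth fuel node longest).1.getD j 0 =
          if pvReach children fuel node j then pvV children depth ((j : Nat) : Int)
          else longest.getD j 0 := by
  intro fuel
  induction fuel with
  | zero => intro node longest _ hf _; have := pvRank_pos children node; omega
  | succ g ih =>
    intro node longest hmem hf hlen
    obtain ⟨h0, hn, hL⟩ := hb node hmem
    have hget : PySem.List.pyGet? children node = some (pvKids children node) :=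
      pvKids_get children node h0 hL
    have hkidsR : ∀ c ∈ pvKids children node, c ∈ pvRch children :=
      fun c hc => pvRch_closed children node hmem c hc
    have hkidsrk : ∀ c ∈ pvKids children node, pvRank children c < pvRank children node :=
      pvRank_lt children node (hacy node hmem)
    by_cases hnil : pvKids children node = []
    · -- leaf
      have hdlt : node < (depth.length : Int) := hd node hmem hnil
      have hdget : PySem.List.pyGet? depth node = some (depth.getD node.toNat 0) := by
        rw [PySem.List.pyGet?_of_nonneg depth h0,
            List.getElem?_eq_getElem (by omega : node.toNat < depth.length),
            List.getD_eq_getElem _ _ (by omega : node.toNat < depth.length)]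
      have hstep : pvDfsA children depth (g+1) node longest
          = (PySem.List.pySetD longest node (depth.getD node.toNat 0 + 1),
             depth.getD node.toNat 0 + 1) := by
        rw [pvDfsA_unfold, hget, hnil, hdget]; simp
      have hval : pvVal children depth (g+1) node = depth.getD node.toNat 0 + 1 := by
        rw [pvVal_unfold, hget, hnil, hdget]; simp
      have hvalV : pvV children depth node = depth.getD node.toNat 0 + 1 := by
        unfold pvV
        rw [pvVal_unfold, hget, hnil, hdget]; simp
      have hreach : ∀ j : Nat, pvReach children (g+1) node j = (node == (j : Int)) := by
        intro j; rw [pvReach_unfold, hget, hnil]; simp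
      rw [hstep]
      refine ⟨hval.symm, by rw [PySem.List.length_pySetD]; exact hlen, ?_⟩
      intro j hj
      rw [PySem.List.pySetD_of_nonneg longest _ h0, hreach j]
      by_cases hje : node.toNat = j
      · have hnode : node = (j : Int) := by omega
        rw [List.getD_eq_getElem _ _ (by rw [List.length_set]; omega),
            List.getElem_set, if_pos hje]
        rw [if_pos (by simp [hnode]), ← hnode, hvalV]
      · have hnode : ¬ ((node == (j : Int)) = true) := by simp only [beq_iff_eq]; omega
        rw [List.getD_eq_getElem _ _ (by rw [List.length_set]; omega),
            List.getElem_set, if_neg hje, if_neg hnode,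
            List.getD_eq_getElem _ _ (by omega : j < longest.length)]
    · -- internal node
      have hstep : pvDfsA children depth (g+1) node longest
          = (PySem.List.pySetD
               ((pvKids children node).foldl (fun (st : List Int × Int) c =>
                  let t := pvDfsA children depth g c st.1
                  (t.1, max st.2 t.2)) (longest, 0)).1 node
               ((pvKids children node).foldl (fun (st : List Int × Int) c =>
                  let t := pvDfsA children depth g c st.1
                  (t.1, max st.2 t.2)) (longest, 0)).2,
             ((pvKids children node).foldl (fun (st : List Int × Int) c =>
                  let t := pvDfsA children depth g c st.1
                  (t.1, max st.2 t.2)) (longest, 0)).2) := by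
        rw [pvDfsA_unfold, hget]; simp [hnil]
      have hval : pvVal children depth (g+1) node
          = (pvKids children node).foldl
              (fun m c => max m (pvVal children depth g c)) 0 := by
        rw [pvVal_unfold, hget]; simp [hnil]
      have hreach : ∀ j : Nat, pvReach children (g+1) node j
          = (node == (j : Int) || (pvKids children node).any
              (fun c => pvReach children g c j)) := by
        intro j; rw [pvReach_unfold, hget]
      have hfold : ∀ l : List Int,
          (∀ c ∈ l, c ∈ pvRch children ∧ pvRank children c < pvRank children node) →
          ∀ L : List Int, ∀ m : Int, L.length = n.toNat →
          (l.foldl (fun (st : List Int × Int) c =>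
              let t := pvDfsA children depth g c st.1
              (t.1, max st.2 t.2)) (L, m)).2
            = l.foldl (fun m c => max m (pvVal children depth g c)) m ∧
          (l.foldl (fun (st : List Int × Int) c =>
              let t := pvDfsA children depth g c st.1
              (t.1, max st.2 t.2)) (L, m)).1.length = n.toNat ∧
          ∀ j : Nat, j < n.toNat →
            (l.foldl (fun (st : List Int × Int) c =>
                let t := pvDfsA children depth g c st.1
                (t.1, max st.2 t.2)) (L, m)).1.getD j 0
              = if l.any (fun c => pvReach children g c j) then pvV children depth ((j : Nat) : Int)
                else L.getD j 0 := by
        intro l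
        induction l with
        | nil => intro _ L m hL; exact ⟨rfl, hL, fun j hj => by simp⟩
        | cons c l' ihl =>
          intro hbound L m hL
          obtain ⟨hcR, hcrk⟩ := hbound c (List.mem_cons_self)
          obtain ⟨hsnd, hlen1, hent1⟩ := ih c L hcR (by omega) hL
          simp only [List.foldl_cons]
          obtain ⟨hsnd2, hlen2, hent2⟩ :=
            ihl (fun x hx => hbound x (List.mem_cons_of_mem c hx))
              (pvDfsA children depth g c L).1 (max m (pvDfsA children depth g c L).2) hlen1
          refine ⟨by rw [hsnd2, hsnd], hlen2, ?_⟩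
          intro j hj
          rw [hent2 j hj, hent1 j hj]
          by_cases h1 : l'.any (fun c => pvReach children g c j) = true
          · simp [h1]
          · by_cases h2 : pvReach children g c j = true
            · simp [h1, h2]
            · simp [h1, h2]
      obtain ⟨hsnd, hlenf, hentf⟩ := hfold (pvKids children node)
        (fun c hc => ⟨hkidsR c hc, hkidsrk c hc⟩) longest 0 hlen
      rw [hstep]
      refine ⟨by rw [hsnd, hval], by rw [PySem.List.length_pySetD]; exact hlenf, ?_⟩
      intro j hj
      rw [PySem.List.pySetD_of_nonneg _ _ h0, hreach j]
      by_cases hje : node.toNat = j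
      · have hnode : node = (j : Int) := by omega
        rw [List.getD_eq_getElem _ _ (by rw [List.length_set, hlenf]; omega),
            List.getElem_set, if_pos hje]
        rw [if_pos (by simp [hnode])]
        rw [hsnd, ← hval, ← hnode]
        exact pvVal_stable children depth n hb hacy node hmem (g+1) hf
      · have hnode : ¬ ((node == (j : Int)) = true) := by simp only [beq_iff_eq]; omega
        rw [List.getD_eq_getElem _ _ (by rw [List.length_set, hlenf]; omega),
            List.getElem_set, if_neg hje,
            ← List.getD_eq_getElem _ _ (by omega : j < _),
            hentf j hj]
        have : (node == (j:Int) || (pvKids children node).any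
            (fun c => pvReach children g c j))
            = (pvKids children node).any (fun c => pvReach children g c j) := by
          simp [hnode]
        rw [this]


-- ---------- B-side: BFS collects exactly pvRch ----------

theorem pvRch_len_le_flatten (children : List (List Int)) :
    (pvRch children).length ≤ children.flatten.length + 1 := by
  have h1 : (pvRch children).length ≤ ((0:Int) :: children.flatten).dedup.length := by
    refine nodup_subset_length _ _ (nodup_pvRch children) (List.nodup_dedup _) ?_
    intro x hx
    refine List.mem_dedup.mpr ?_
    have := pvCloseN_subset_cand children ((0:Int) :: children.flatten)
      (fun y hy => List.mem_cons_of_mem _ hy) (pvFuel children) [0]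
      (by intro y hy; simp at hy; simp [hy]) x hx
    exact this
  have h2 : ((0:Int) :: children.flatten).dedup.length ≤ ((0:Int) :: children.flatten).length :=
    (List.dedup_sublist _).length_le
  simp only [List.length_cons] at h2
  omega

theorem pvBfsFold :
    ∀ (cs : List Int) (o : List Int),
      ((cs.foldl (fun (st : List Int × PySem.Set Int) c =>
          if PySem.Set.contains st.2 c then st
          else (st.1 ++ [c], PySem.Set.add st.2 c)) (o, o)).2
        = (cs.foldl (fun (st : List Int × PySem.Set Int) c =>
          if PySem.Set.contains st.2 c then st
          else (st.1 ++ [c], PySem.Set.add st.2 c)) (o, o)).1) ∧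
      (∀ x, x ∈ (cs.foldl (fun (st : List Int × PySem.Set Int) c =>
          if PySem.Set.contains st.2 c then st
          else (st.1 ++ [c], PySem.Set.add st.2 c)) (o, o)).1 ↔ x ∈ o ∨ x ∈ cs) ∧
      (o.Nodup → (cs.foldl (fun (st : List Int × PySem.Set Int) c =>
          if PySem.Set.contains st.2 c then st
          else (st.1 ++ [c], PySem.Set.add st.2 c)) (o, o)).1.Nodup) ∧
      (∃ t, (cs.foldl (fun (st : List Int × PySem.Set Int) c =>
          if PySem.Set.contains st.2 c then st
          else (st.1 ++ [c], PySem.Set.add st.2 c)) (o, o)).1 = o ++ t) := by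
  intro cs
  induction cs with
  | nil =>
    intro o
    exact ⟨rfl, fun x => by simp, fun h => h, ⟨[], by simp⟩⟩
  | cons c cs' ih =>
    intro o
    simp only [List.foldl_cons]
    by_cases hc : PySem.Set.contains o c = true
    · have hcm : c ∈ o := by
        simpa [PySem.Set.contains] using hc
      rw [if_pos hc]
      obtain ⟨e1, e2, e3, e4⟩ := ih o
      refine ⟨e1, ?_, e3, e4⟩
      intro x
      rw [e2 x]
      constructor
      · rintro (h | h)
        · exact Or.inl h
        · exact Or.inr (List.mem_cons_of_mem c h)
      · rintro (h | h)
        · exact Or.inl h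
        · rcases List.mem_cons.mp h with h | h
          · exact Or.inl (h ▸ hcm)
          · exact Or.inr h
    · have hcm : c ∉ o := by
        simpa [PySem.Set.contains] using hc
      rw [if_neg hc]
      have hadd : PySem.Set.add o c = o ++ [c] := by
        simp [PySem.Set.add, PySem.Set.contains]
        intro h
        exact absurd h hcm
      rw [hadd]
      obtain ⟨e1, e2, e3, e4⟩ := ih (o ++ [c])
      refine ⟨e1, ?_, ?_, ?_⟩
      · intro x
        rw [e2 x]
        simp only [List.mem_append, List.mem_cons]
        tauto
      · intro hnod
        refine e3 ?_
        rw [List.nodup_append]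
        refine ⟨hnod, List.nodup_singleton c, ?_⟩
        intro a ha b hbm
        simp only [List.mem_singleton] at hbm
        subst hbm
        intro h
        exact hcm (h ▸ ha)
      · obtain ⟨t, ht⟩ := e4
        exact ⟨c :: t, by simpa using ht⟩

theorem pvBfs_spec (children : List (List Int)) :
    ∀ fuel : Nat, ∀ order : List Int, ∀ qi : Nat,
      order.Nodup → qi ≤ order.length →
      (∀ i, i < qi → ∀ c ∈ pvKids children (order.getD i 0), c ∈ order) →
      (∀ x ∈ order, x ∈ pvRch children) → (0:Int) ∈ order →
      (pvRch children).length + 1 ≤ fuel + qi →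
      (pvBfs children fuel order order qi).Nodup ∧
      (∀ x, x ∈ pvBfs children fuel order order qi ↔ x ∈ pvRch children) := by
  intro fuel
  induction fuel with
  | zero =>
    intro order qi hnod hqi _ hsub _ hfuel
    have := nodup_subset_length order (pvRch children) hnod (nodup_pvRch children) hsub
    omega
  | succ g ih =>
    intro order qi hnod hqi hclosed hsub h0 hfuel
    by_cases hlt : qi < order.length
    · have hstep : pvBfs children (g+1) order order qi
          = pvBfs children g
              ((pvKids children (order.getD qi 0)).foldl
                (fun (st : List Int × PySem.Set Int) c =>
                  if PySem.Set.contains st.2 c then st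
                  else (st.1 ++ [c], PySem.Set.add st.2 c)) (order, order)).1
              ((pvKids children (order.getD qi 0)).foldl
                (fun (st : List Int × PySem.Set Int) c =>
                  if PySem.Set.contains st.2 c then st
                  else (st.1 ++ [c], PySem.Set.add st.2 c)) (order, order)).2
              (qi+1) := by
        show (if qi < order.length then _ else _) = _
        rw [if_pos hlt]
      obtain ⟨e1, e2, e3, ⟨t, ht⟩⟩ := pvBfsFold (pvKids children (order.getD qi 0)) order
      set u := order.getD qi 0 with hu
      have humem : u ∈ order := by
        rw [hu, List.getD_eq_getElem _ _ hlt]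
        exact List.getElem_mem hlt
      have huR : u ∈ pvRch children := hsub u humem
      have hkidsR : ∀ c ∈ pvKids children u, c ∈ pvRch children :=
        fun c hc => pvRch_closed children u huR c hc
      set o' := ((pvKids children u).foldl
        (fun (st : List Int × PySem.Set Int) c =>
          if PySem.Set.contains st.2 c then st
          else (st.1 ++ [c], PySem.Set.add st.2 c)) (order, order)).1 with ho'
      rw [hstep, e1]
      have hpref : ∀ i, i < order.length → o'.getD i 0 = order.getD i 0 := by
        intro i hi
        rw [ht, List.getD_append _ _ _ _ hi]
      refine ih o' (qi+1) (e3 hnod) ?_ ?_ ?_ ?_ ?_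
      · rw [ht]
        rw [List.length_append]
        omega
      · intro i hi c hc
        rcases Nat.lt_or_ge i qi with hiq | hiq
        · rw [hpref i (by omega)] at hc
          exact (e2 c).mpr (Or.inl (hclosed i hiq c hc))
        · have : i = qi := by omega
          subst this
          rw [hpref i hlt, ← hu] at hc
          exact (e2 c).mpr (Or.inr hc)
      · intro x hx
        rcases (e2 x).mp hx with h | h
        · exact hsub x h
        · exact hkidsR x h
      · exact (e2 0).mpr (Or.inl h0)
      · omega
    · have hstop : pvBfs children (g+1) order order qi = order := by
        show (if qi < order.length then _ else _) = _
        rw [if_neg hlt]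
      rw [hstop]
      have hqe : qi = order.length := by omega
      have hclosed' : ∀ a ∈ order, ∀ c ∈ pvKids children a, c ∈ order := by
        intro a ha c hc
        rcases List.mem_iff_getElem.mp ha with ⟨i, hi, hia⟩
        refine hclosed i (by omega) c ?_
        rwa [List.getD_eq_getElem _ _ hi, hia]
      refine ⟨hnod, fun x => ⟨fun hx => hsub x hx, fun hx => ?_⟩⟩
      exact pvCloseN_least children order hclosed' (pvFuel children) [0]
        (by intro y hy; simp at hy; rw [hy]; exact h0) x hx


-- ---------- B-side: value iteration ----------

theorem foldl_max_shift (f : Int → Int) :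
    ∀ (l : List Int) (a b : Int),
      l.foldl (fun m c => max m (f c)) (max a b) = max a (l.foldl (fun m c => max m (f c)) b) := by
  intro l
  induction l with
  | nil => intro a b; rfl
  | cons c l' ih =>
    intro a b
    simp only [List.foldl_cons]
    rw [max_assoc, ih]

theorem pvNew_eq_pvV (children : List (List Int)) (depth : List Int) (n : Int)
    (hb : ∀ r ∈ pvRch children, 0 ≤ r ∧ r < n ∧ r < (children.length : Int))
    (hd : ∀ r ∈ pvRch children, pvKids children r = [] → r < (depth.length : Int))
    (hacy : ∀ r ∈ pvRch children,
      r ∉ pvCloseN children (pvFuel children) ((pvKids children r).dedup))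
    (v : PySem.Dict Int Int) (u : Int) (hu : u ∈ pvRch children)
    (hkc : ∀ c ∈ pvKids children u, PySem.Dict.getD v c 0 = pvV children depth c) :
    pvNew children depth v u = pvV children depth u := by
  obtain ⟨h0, hn, hL⟩ := hb u hu
  have hget : PySem.List.pyGet? children u = some (pvKids children u) :=
    pvKids_get children u h0 hL
  unfold pvNew pvV
  rw [pvVal_unfold, hget]
  cases hcs : pvKids children u with
  | nil =>
    have hdlt : u < (depth.length : Int) := hd u hu hcs
    have hdget : PySem.List.pyGet? depth u = some (depth.getD u.toNat 0) := by
      rw [PySem.List.pyGet?_of_nonneg depth h0,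
          List.getElem?_eq_getElem (by omega : u.toNat < depth.length),
          List.getD_eq_getElem _ _ (by omega : u.toNat < depth.length)]
    rw [hdget]
    simp
  | cons c0 rest =>
    simp only [reduceCtorEq, if_false]
    have hmem : ∀ c ∈ c0 :: rest, c ∈ pvKids children u := by rw [hcs]; exact fun c h => h
    have hstab : ∀ c ∈ c0 :: rest,
        pvVal children depth children.length c = pvV children depth c := by
      intro c hc
      have hcR : c ∈ pvRch children := pvRch_closed children u hu c (hmem c hc)
      exact pvVal_stable children depth n hb hacy c hcR children.length
        (pvRank_le_L children n c hcR hb)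
    have hcongr : (c0 :: rest).foldl (fun m c => max m (pvVal children depth children.length c)) 0
        = (c0 :: rest).foldl (fun m c => max m (pvV children depth c)) 0 := by
      refine PySem.List.foldl_congr_mem _ _ _ 0 ?_
      intro acc c hc
      rw [hstab c hc]
    rw [hcongr]
    have hshift : (c0 :: rest).foldl (fun m c => max m (pvV children depth c)) 0
        = max 0 (rest.foldl (fun m c => max m (pvV children depth c)) (pvV children depth c0)) := by
      simp only [List.foldl_cons]
      rw [← foldl_max_shift (pvV children depth) rest 0 (pvV children depth c0)]
    rw [hshift]
    congr 1
    have h1 : PySem.Dict.getD v c0 0 = pvV children depth c0 :=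
      hkc c0 (hcs ▸ List.mem_cons_self)
    rw [← h1]
    refine PySem.List.foldl_congr_mem _ _ _ _ ?_
    intro acc c hc
    rw [hkc c (hcs ▸ List.mem_cons_of_mem c0 hc)]

theorem pvRoundFold (children : List (List Int)) (depth : List Int) (n : Int)
    (hb : ∀ r ∈ pvRch children, 0 ≤ r ∧ r < n ∧ r < (children.length : Int))
    (hd : ∀ r ∈ pvRch children, pvKids children r = [] → r < (depth.length : Int))
    (hacy : ∀ r ∈ pvRch children,
      r ∉ pvCloseN children (pvFuel children) ((pvKids children r).dedup))
    (t : Nat) :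
    ∀ l : List Int, l.Nodup → (∀ u ∈ l, u ∈ pvRch children) →
    ∀ st : PySem.Dict Int Int × Bool,
      (∀ w ∈ pvRch children, pvRank children w ≤ t →
        PySem.Dict.getD st.1 w 0 = pvV children depth w) →
      (∀ w ∈ pvRch children, pvRank children w ≤ t →
        PySem.Dict.getD (l.foldl (fun (st : PySem.Dict Int Int × Bool) u =>
          let new := pvNew children depth st.1 u
          if new = PySem.Dict.getD st.1 u 0 then st
          else (PySem.Dict.insert st.1 u new, true)) st).1 w 0 = pvV children depth w) ∧
      (∀ w : Int, w ∉ l →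
        PySem.Dict.getD (l.foldl (fun (st : PySem.Dict Int Int × Bool) u =>
          let new := pvNew children depth st.1 u
          if new = PySem.Dict.getD st.1 u 0 then st
          else (PySem.Dict.insert st.1 u new, true)) st).1 w 0 = PySem.Dict.getD st.1 w 0) ∧
      (∀ w ∈ l, w ∈ pvRch children → pvRank children w ≤ t + 1 →
        PySem.Dict.getD (l.foldl (fun (st : PySem.Dict Int Int × Bool) u =>
          let new := pvNew children depth st.1 u
          if new = PySem.Dict.getD st.1 u 0 then st
          else (PySem.Dict.insert st.1 u new, true)) st).1 w 0 = pvV children depth w) := by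
  intro l
  induction l with
  | nil =>
    intro _ _ st hJ
    exact ⟨hJ, fun w _ => rfl, fun w hw => absurd hw (List.not_mem_nil)⟩
  | cons u l' ihl =>
    intro hnod hmem st hJ
    have huR : u ∈ pvRch children := hmem u List.mem_cons_self
    have hul' : u ∉ l' := (List.nodup_cons.mp hnod).1
    simp only [List.foldl_cons]
    set st' := (let new := pvNew children depth st.1 u
      if new = PySem.Dict.getD st.1 u 0 then st
      else (PySem.Dict.insert st.1 u new, true)) with hst'
    have hnew_of : pvRank children u ≤ t + 1 →
        pvNew children depth st.1 u = pvV children depth u := by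
      intro hrk
      refine pvNew_eq_pvV children depth n hb hd hacy st.1 u huR ?_
      intro c hc
      have hcR : c ∈ pvRch children := pvRch_closed children u huR c hc
      have := pvRank_lt children u (hacy u huR) c hc
      exact hJ c hcR (by omega)
    have hJ' : ∀ w ∈ pvRch children, pvRank children w ≤ t →
        PySem.Dict.getD st'.1 w 0 = pvV children depth w := by
      intro w hw hrk
      rw [hst']
      simp only
      split
      · exact hJ w hw hrk
      · rw [PySem.Dict.getD_insert]
        by_cases hwu : w = u
        · rw [if_pos hwu, hwu, hnew_of (by rw [← hwu]; omega)]
        · rw [if_neg hwu]; exact hJ w hw hrk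
    have hst'u : pvRank children u ≤ t + 1 →
        PySem.Dict.getD st'.1 u 0 = pvV children depth u := by
      intro hrk
      rw [hst']
      simp only
      split
      · rename_i heq
        rw [← heq, hnew_of hrk]
      · rw [PySem.Dict.getD_insert, if_pos rfl, hnew_of hrk]
    have hst'other : ∀ w : Int, w ≠ u →
        PySem.Dict.getD st'.1 w 0 = PySem.Dict.getD st.1 w 0 := by
      intro w hwu
      rw [hst']
      simp only
      split
      · rfl
      · rw [PySem.Dict.getD_insert, if_neg hwu]
    obtain ⟨r1, r2, r3⟩ := ihl (List.nodup_cons.mp hnod).2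
      (fun x hx => hmem x (List.mem_cons_of_mem u hx)) st' hJ'
    refine ⟨r1, ?_, ?_⟩
    · intro w hw
      have hwu : w ≠ u := fun h => hw (h ▸ List.mem_cons_self)
      have hwl' : w ∉ l' := fun h => hw (List.mem_cons_of_mem u h)
      rw [r2 w hwl', hst'other w hwu]
    · intro w hw hwR hrk
      rcases List.mem_cons.mp hw with h | h
      · subst h
        rw [r2 w hul', hst'u hrk]
      · exact r3 w h hwR hrk

theorem pvRoundFoldFalse (children : List (List Int)) (depth : List Int) :
    ∀ l : List Int, ∀ st : PySem.Dict Int Int × Bool,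
      (l.foldl (fun (st : PySem.Dict Int Int × Bool) u =>
        let new := pvNew children depth st.1 u
        if new = PySem.Dict.getD st.1 u 0 then st
        else (PySem.Dict.insert st.1 u new, true)) st).2 = false →
      st.2 = false ∧
      (l.foldl (fun (st : PySem.Dict Int Int × Bool) u =>
        let new := pvNew children depth st.1 u
        if new = PySem.Dict.getD st.1 u 0 then st
        else (PySem.Dict.insert st.1 u new, true)) st).1 = st.1 ∧
      ∀ u ∈ l, pvNew children depth st.1 u = PySem.Dict.getD st.1 u 0 := by
  intro l
  induction l with
  | nil => exact fun st h => ⟨h, rfl, fun u hu => absurd hu (List.not_mem_nil)⟩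
  | cons u l' ihl =>
    intro st h
    simp only [List.foldl_cons] at h ⊢
    by_cases heq : pvNew children depth st.1 u = PySem.Dict.getD st.1 u 0
    · rw [if_pos heq] at h ⊢
      obtain ⟨f1, f2, f3⟩ := ihl st h
      refine ⟨f1, f2, ?_⟩
      intro x hx
      rcases List.mem_cons.mp hx with hxu | hxl
      · rw [hxu]; exact heq
      · exact f3 x hxl
    · rw [if_neg heq] at h
      obtain ⟨f1, _, _⟩ := ihl _ h
      simp at f1

theorem pvFixpoint_corr (children : List (List Int)) (depth : List Int) (n : Int)
    (hb : ∀ r ∈ pvRch children, 0 ≤ r ∧ r < n ∧ r < (children.length : Int))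
    (hd : ∀ r ∈ pvRch children, pvKids children r = [] → r < (depth.length : Int))
    (hacy : ∀ r ∈ pvRch children,
      r ∉ pvCloseN children (pvFuel children) ((pvKids children r).dedup))
    (v : PySem.Dict Int Int)
    (hfix : ∀ u ∈ pvRch children, pvNew children depth v u = PySem.Dict.getD v u 0) :
    ∀ k : Nat, ∀ u ∈ pvRch children, pvRank children u ≤ k →
      PySem.Dict.getD v u 0 = pvV children depth u := by
  intro k
  induction k with
  | zero => intro u _ hk; have := pvRank_pos children u; omega
  | succ m ih =>
    intro u hu hk
    rw [← hfix u hu]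
    refine pvNew_eq_pvV children depth n hb hd hacy v u hu ?_
    intro c hc
    have hcR : c ∈ pvRch children := pvRch_closed children u hu c hc
    have := pvRank_lt children u (hacy u hu) c hc
    exact ih c hcR (by omega)

theorem pvIter_corr (children : List (List Int)) (depth : List Int) (n : Int)
    (hb : ∀ r ∈ pvRch children, 0 ≤ r ∧ r < n ∧ r < (children.length : Int))
    (hd : ∀ r ∈ pvRch children, pvKids children r = [] → r < (depth.length : Int))
    (hacy : ∀ r ∈ pvRch children,
      r ∉ pvCloseN children (pvFuel children) ((pvKids children r).dedup))
    (order : List Int) (hornod : order.Nodup)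
    (hor : ∀ x, x ∈ order ↔ x ∈ pvRch children) :
    ∀ fuel t : Nat, ∀ v : PySem.Dict Int Int,
      (∀ w ∈ pvRch children, pvRank children w ≤ t →
        PySem.Dict.getD v w 0 = pvV children depth w) →
      (pvRch children).length + 1 ≤ fuel + t →
      ∀ u ∈ pvRch children,
        PySem.Dict.getD (pvIter children depth order fuel v) u 0 = pvV children depth u := by
  intro fuel
  induction fuel with
  | zero =>
    intro t v hC hfuel u hu
    have hrk := pvRank_le_len children u hu
    exact hC u hu (by omega)
  | succ g ih =>
    intro t v hC hfuel u hu
    obtain ⟨r1, r2, r3⟩ := pvRoundFold children depth n hb hd hacy t order hornod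
      (fun x hx => (hor x).mp hx) (v, false) hC
    have hC' : ∀ w ∈ pvRch children, pvRank children w ≤ t + 1 →
        PySem.Dict.getD (pvRound children depth order v).1 w 0 = pvV children depth w := by
      intro w hw hrk
      exact r3 w ((hor w).mpr hw) hw hrk
    show PySem.Dict.getD
      (if (pvRound children depth order v).2 then
        pvIter children depth order g (pvRound children depth order v).1
       else (pvRound children depth order v).1) u 0 = pvV children depth u
    by_cases hfl : (pvRound children depth order v).2 = true
    · rw [if_pos hfl]
      exact ih (t+1) (pvRound children depth order v).1 hC' (by omega) u hu
    · rw [if_neg hfl]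
      obtain ⟨_, f2, f3⟩ := pvRoundFoldFalse children depth order (v, false)
        (by simpa using hfl)
      have hfix : ∀ w ∈ pvRch children,
          pvNew children depth v w = PySem.Dict.getD v w 0 := by
        intro w hw
        exact f3 w ((hor w).mpr hw)
      have hfull := pvFixpoint_corr children depth n hb hd hacy v hfix
        (pvRank children u) u hu (le_refl _)
      show PySem.Dict.getD (pvRound children depth order v).1 u 0 = pvV children depth u
      unfold pvRound
      rw [show (order.foldl (fun (st : PySem.Dict Int Int × Bool) u =>
        let new := pvNew children depth st.1 u
        if new = PySem.Dict.getD st.1 u 0 then st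
        else (PySem.Dict.insert st.1 u new, true)) (v, false)).1 = v from f2]
      exact hfull

-- ---------- B-side: the final write-out pass ----------

theorem pvFill (n : Int) (val : PySem.Dict Int Int) :
    ∀ l : List Int, l.Nodup → (∀ u ∈ l, 0 ≤ u ∧ u < n) →
    ∀ L : List Int, L.length = n.toNat →
      ((l.foldl (fun longest u =>
        PySem.List.pySetD longest u (PySem.Dict.getD val u 0)) L).length = n.toNat) ∧
      ∀ j : Nat, j < n.toNat →
        (l.foldl (fun longest u =>
          PySem.List.pySetD longest u (PySem.Dict.getD val u 0)) L).getD j 0 =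
          if ((j : Nat) : Int) ∈ l then PySem.Dict.getD val ((j : Nat) : Int) 0
          else L.getD j 0 := by
  intro l
  induction l with
  | nil => exact fun _ _ L hL => ⟨hL, fun j hj => by simp⟩
  | cons u l' ihl =>
    intro hnod hbound L hL
    obtain ⟨hu0, hun⟩ := hbound u List.mem_cons_self
    have hul' : u ∉ l' := (List.nodup_cons.mp hnod).1
    simp only [List.foldl_cons]
    have hset : PySem.List.pySetD L u (PySem.Dict.getD val u 0)
        = L.set u.toNat (PySem.Dict.getD val u 0) :=
      PySem.List.pySetD_of_nonneg L _ hu0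
    rw [hset]
    obtain ⟨e1, e2⟩ := ihl (List.nodup_cons.mp hnod).2
      (fun x hx => hbound x (List.mem_cons_of_mem u hx))
      (L.set u.toNat (PySem.Dict.getD val u 0)) (by rw [List.length_set]; exact hL)
    refine ⟨e1, ?_⟩
    intro j hj
    rw [e2 j hj]
    by_cases hjl : ((j : Nat) : Int) ∈ l'
    · rw [if_pos hjl, if_pos (List.mem_cons_of_mem u hjl)]
    · rw [if_neg hjl]
      by_cases hju : ((j : Nat) : Int) = u
      · rw [if_pos (List.mem_cons.mpr (Or.inl hju))]
        have hjt : u.toNat = j := by omega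
        rw [List.getD_eq_getElem _ _ (by rw [List.length_set]; omega),
            List.getElem_set, if_pos hjt, hju]
      · rw [if_neg (by
          intro h
          rcases List.mem_cons.mp h with h | h
          · exact hju h
          · exact hjl h)]
        have hjt : ¬ (u.toNat = j) := by omega
        rw [List.getD_eq_getElem _ _ (by rw [List.length_set]; omega),
            List.getElem_set, if_neg hjt,
            List.getD_eq_getElem _ _ (by omega : j < L.length)]

-- ---------- final assembly ----------

theorem pv_main (children : List (List Int)) (depth : List Int) (n : Int)
    (hpre : Pre_longest_path_to_leaf children depth n) :
    longest_path_to_leaf children depth n = longest_path_to_leaf_alt children depth n := by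
  obtain ⟨hbd, hacy⟩ := hpre
  have hb : ∀ r ∈ pvRch children, 0 ≤ r ∧ r < n ∧ r < (children.length : Int) :=
    fun r hr => (hbd r hr).1
  have hd : ∀ r ∈ pvRch children, pvKids children r = [] → r < (depth.length : Int) :=
    fun r hr => (hbd r hr).2
  have h0R : (0:Int) ∈ pvRch children := zero_mem_pvRch children
  have hn0 : 0 < n := (hb 0 h0R).2.1
  -- A side
  have hrank0 : pvRank children 0 ≤ children.length := pvRank_le_L children n 0 h0R hb
  obtain ⟨_, hAlen, hAent⟩ := pvDfsA_spec children depth n hb hd hacy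
    (n.toNat + children.length + children.flatten.length + 3) 0 (List.replicate n.toNat 0)
    h0R (by omega) (by simp)
  -- B side: the BFS order
  have hflat : (pvRch children).length ≤ children.flatten.length + 1 :=
    pvRch_len_le_flatten children
  obtain ⟨hons, homem⟩ := pvBfs_spec children (children.flatten.length + 2) [0] 0
    (by simp) (by simp)
    (by intro i hi; omega)
    (by intro x hx; simp at hx; rw [hx]; exact h0R)
    (by simp)
    (by omega)
  set order := pvBfs children (children.flatten.length + 2) [0] [0] 0 with horder
  -- the value iteration settles at pvV
  have hlenord : (pvRch children).length ≤ order.length := by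
    refine nodup_subset_length _ _ (nodup_pvRch children) hons ?_
    intro x hx
    exact (homem x).mpr hx
  have hval : ∀ u ∈ pvRch children,
      PySem.Dict.getD (pvIter children depth order (order.length + 2)
        (order.foldl (fun d u => PySem.Dict.insert d u 0) PySem.Dict.empty)) u 0
        = pvV children depth u := by
    refine pvIter_corr children depth n hb hd hacy order hons homem (order.length + 2) 0 _
      ?_ (by omega)
    intro w _ hrk
    have := pvRank_pos children w
    omega
  -- the write-out pass
  obtain ⟨hBlen, hBent⟩ := pvFill n
    (pvIter children depth order (order.length + 2)
      (order.foldl (fun d u => PySem.Dict.insert d u 0) PySem.Dict.empty))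
    order hons
    (by
      intro u hu
      have := hb u ((homem u).mp hu)
      omega)
    (List.replicate n.toNat 0) (by simp)
  -- both results
  have hofl : PySem.Set.ofList ([0] : List Int) = ([0] : List Int) := rfl
  unfold longest_path_to_leaf longest_path_to_leaf_alt
  rw [hofl]
  apply List.ext_getElem (by rw [hAlen, ← horder, hBlen])
  intro j h1 h2
  have hj : j < n.toNat := by rw [hAlen] at h1; exact h1
  have hAj := hAent j hj
  have hBj := hBent j hj
  rw [← List.getD_eq_getElem _ 0 h1, ← List.getD_eq_getElem _ 0 h2, hAj, ← horder, hBj]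
  by_cases hmem : ((j : Nat) : Int) ∈ pvRch children
  · have hreach : pvReach children
        (n.toNat + children.length + children.flatten.length + 3) 0 j = true := by
      have h1r := pvRch_to_reach children n hb (pvFuel children) ((j : Nat) : Int) hmem
      rw [Int.toNat_natCast] at h1r
      refine pvReach_le children (pvFuel children + 1) _ ?_ 0 j h1r
      simp only [pvFuel]
      omega
    rw [if_pos hreach, if_pos ((homem _).mpr hmem), hval _ hmem]
  · have hreach : pvReach children
        (n.toNat + children.length + children.flatten.length + 3) 0 j = false := by
      by_contra hq
      rw [Bool.not_eq_false] at hq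
      exact hmem (reach_to_pvRch children n hb _ 0 j h0R hq)
    rw [if_neg (by rw [hreach]; exact Bool.false_ne_true),
        if_neg (fun h => hmem ((homem _).mp h))]

-- ===== VERDICT (by name: the statement is the Claim_ definition above) =====
theorem longest_path_to_leaf_spec : Claim_equal_longest_path_to_leaf := by
  intro children depth n _ hpre
  unfold Spec_longest_path_to_leaf
  exact pv_main children depth n hpre
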